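-- pv_equiv track=rewrite | github.com/Pastlink/math-tools | common_tools.py | clean_string_strict
-- ===== SOURCE A (Python) =====
-- def clean_string_strict(sub_array: str) -> str:
--     clean_values = ""
--
--     for i in range(len(sub_array)):
--         try:  # If sub array's value can be cast into int, then it is a valid number.
--             clean_values += str(int(sub_array[i]))
--         except ValueError:  # Else try to extract the number checking for float points.
--             if sub_array[i] == "." and sub_array[i] not in clean_values:
--                 clean_values += sub_array[i]
--             continue
--
--     return clean_values
-- ===== SOURCE B (Python) =====
-- def clean_string_strict(sub_array: str) -> str:
--     head, sep, tail = sub_array.partition(".")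
--
--     def keep_ints(segment: str) -> str:
--         kept = []
--         for c in segment:
--             try:
--                 kept.append(str(int(c)))
--             except ValueError:
--                 pass
--         return "".join(kept)
--
--     return keep_ints(head) + sep + keep_ints(tail)
-- ===== Notes on version B (the rewrite author's own statement) =====
-- stated objective: simpler
-- what changed: Replaces A's single stateful loop (dot-seen tracked by a membership test on the accumulator) with str.partition isolating the first decimal point structurally, then two stateless int(c)-filtering passes joined around the separator.
import Mathlib
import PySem

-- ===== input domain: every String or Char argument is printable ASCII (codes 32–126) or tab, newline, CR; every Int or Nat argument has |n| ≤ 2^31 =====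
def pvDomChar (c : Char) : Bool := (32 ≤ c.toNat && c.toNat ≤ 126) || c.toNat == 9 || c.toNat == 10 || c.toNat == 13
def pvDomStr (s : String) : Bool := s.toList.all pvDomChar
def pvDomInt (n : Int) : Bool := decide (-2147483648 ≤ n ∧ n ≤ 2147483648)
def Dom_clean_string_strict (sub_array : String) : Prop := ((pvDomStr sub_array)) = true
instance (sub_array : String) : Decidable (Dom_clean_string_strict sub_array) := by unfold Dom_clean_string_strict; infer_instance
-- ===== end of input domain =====

-- B replaces A's dot-seen accumulator state with a partition at the first '.' plus two
-- stateless digit-keeping passes (objective: simpler decomposition, same cost).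

-- ===== PORT A =====
-- A: one left-to-right loop; digits (chars accepted by int(...)) are appended normalized,
-- a '.' is appended only if the accumulator does not yet contain one.
def clean_string_strict (sub_array : String) : String :=
  String.mk (sub_array.toList.foldl (fun clean_values c =>
    match PySem.Int.ofChars? [c] with
    | some n => clean_values ++ PySem.Int.toChars n
    | none => if c = '.' ∧ c ∉ clean_values then clean_values ++ [c] else clean_values) [])

-- ===== PORT B =====
-- sub_array.partition('.') : (head, sep, tail), sep = ['.'] iff a dot exists
def pvPartitionDot : List Char → List Char × List Char × List Char
  | [] => ([], [], [])
  | c :: cs =>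
    if c = '.' then ([], ['.'], cs)
    else
      let r := pvPartitionDot cs
      (c :: r.1, r.2.1, r.2.2)

-- keep_ints: append str(int(c)) for each c where int(c) succeeds, then ''.join
def pvKeepInts (segment : List Char) : List Char :=
  PySem.Chars.join [] (segment.foldl (fun kept c =>
    match PySem.Int.ofChars? [c] with
    | some n => kept ++ [PySem.Int.toChars n]
    | none => kept) [])

def clean_string_strict_alt (sub_array : String) : String :=
  let p := pvPartitionDot sub_array.toList
  String.mk (pvKeepInts p.1 ++ p.2.1 ++ pvKeepInts p.2.2)

-- ===== PRECONDITION & SPEC =====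
def Spec_clean_string_strict (sub_array : String) (out : String) : Prop := out = clean_string_strict_alt sub_array
instance (sub_array : String) (out : String) : Decidable (Spec_clean_string_strict sub_array out) := by unfold Spec_clean_string_strict; infer_instance

-- ===== CLAIM (what is proved, stated in full; the proofs are below) =====
def Claim_equal_clean_string_strict : Prop := ∀ (sub_array : String), Dom_clean_string_strict sub_array → Spec_clean_string_strict sub_array (clean_string_strict sub_array)

-- ===== LEMMAS AND PROOFS =====

-- A's loop step, named for the proofs (definitionally the lambda in the port of A)
def pvStepA (acc : List Char) (c : Char) : List Char :=
  match PySem.Int.ofChars? [c] with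
  | some n => acc ++ PySem.Int.toChars n
  | none => if c = '.' ∧ c ∉ acc then acc ++ [c] else acc

-- the digit-normalizing filter, as a flatMap
def pvDig (l : List Char) : List Char :=
  l.flatMap (fun c => match PySem.Int.ofChars? [c] with
    | some n => PySem.Int.toChars n
    | none => [])

theorem pv_toChars_no_dot (n : Int) : '.' ∉ PySem.Int.toChars n := by
  unfold PySem.Int.toChars
  split
  · intro hc
    rcases List.mem_cons.mp hc with h1 | h1
    · exact absurd h1 (by decide)
    · have := Nat.isDigit_of_mem_toDigits (by norm_num) (by norm_num) h1
      simp [Char.isDigit] at this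
  · intro h1
    have := Nat.isDigit_of_mem_toDigits (by norm_num) (by norm_num) h1
    simp [Char.isDigit] at this

theorem pv_dig_no_dot (l : List Char) : '.' ∉ pvDig l := by
  unfold pvDig
  intro hc
  rcases List.mem_flatMap.mp hc with ⟨c, _, hmem⟩
  revert hmem
  cases h : PySem.Int.ofChars? [c] with
  | none => simp
  | some n => simpa using pv_toChars_no_dot n

theorem pv_dig_cons (c : Char) (l : List Char) :
    pvDig (c :: l) = (match PySem.Int.ofChars? [c] with
      | some n => PySem.Int.toChars n
      | none => []) ++ pvDig l := by
  simp [pvDig]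

theorem pv_flatten_intersperse_nil (parts : List (List Char)) :
    (List.intersperse ([] : List Char) parts).flatten = parts.flatten := by
  induction parts with
  | nil => rfl
  | cons p ps ih =>
    cases ps with
    | nil => rfl
    | cons q qs =>
      simp only [List.intersperse_cons₂, List.flatten_cons] at ih ⊢
      simp [ih]

theorem pv_join_eq_flatten (parts : List (List Char)) :
    PySem.Chars.join [] parts = parts.flatten := by
  simp [PySem.Chars.join, List.intercalate, pv_flatten_intersperse_nil]

theorem pv_keep_aux (l : List Char) (kept : List (List Char)) :
    (l.foldl (fun kept c =>
      match PySem.Int.ofChars? [c] with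
      | some n => kept ++ [PySem.Int.toChars n]
      | none => kept) kept).flatten = kept.flatten ++ pvDig l := by
  induction l generalizing kept with
  | nil => simp [pvDig]
  | cons c cs ih =>
    simp only [List.foldl_cons, pv_dig_cons]
    cases h : PySem.Int.ofChars? [c] with
    | none => simp [ih]
    | some n => simp [h, ih]

theorem pv_keepInts_eq_dig (l : List Char) : pvKeepInts l = pvDig l := by
  unfold pvKeepInts
  rw [pv_join_eq_flatten, pv_keep_aux]
  rfl

theorem pv_stepA_some (acc : List Char) (c : Char) (n : Int)
    (h : PySem.Int.ofChars? [c] = some n) : pvStepA acc c = acc ++ PySem.Int.toChars n := by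
  simp [pvStepA, h]

theorem pv_stepA_none (acc : List Char) (c : Char)
    (h : PySem.Int.ofChars? [c] = none) :
    pvStepA acc c = if c = '.' ∧ c ∉ acc then acc ++ [c] else acc := by
  simp [pvStepA, h]

-- A's loop on a dot-free segment appends exactly the normalized digits
theorem pv_loop_no_dot (l : List Char) (acc : List Char) (h : '.' ∉ l) :
    l.foldl pvStepA acc = acc ++ pvDig l := by
  induction l generalizing acc with
  | nil => simp [pvDig]
  | cons c cs ih =>
    have hc : c ≠ '.' := fun hc => h (by simp [hc])
    have hcs : '.' ∉ cs := fun hm => h (List.mem_cons_of_mem _ hm)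
    simp only [List.foldl_cons, pv_dig_cons]
    cases hof : PySem.Int.ofChars? [c] with
    | some n => rw [pv_stepA_some _ _ _ hof, ih _ hcs, List.append_assoc]
    | none =>
      rw [pv_stepA_none _ _ hof, if_neg (by simp [hc]), ih _ hcs]
      simp

-- once the accumulator contains a dot, A's loop appends exactly the normalized digits
theorem pv_loop_seen (l : List Char) (acc : List Char) (h : '.' ∈ acc) :
    l.foldl pvStepA acc = acc ++ pvDig l := by
  induction l generalizing acc with
  | nil => simp [pvDig]
  | cons c cs ih =>
    simp only [List.foldl_cons, pv_dig_cons]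
    cases hof : PySem.Int.ofChars? [c] with
    | some n =>
      rw [pv_stepA_some _ _ _ hof, ih _ (List.mem_append_left _ h), List.append_assoc]
    | none =>
      rw [pv_stepA_none _ _ hof, if_neg (by
        rintro ⟨rfl, hnot⟩
        exact hnot h), ih _ h]
      simp

-- partition spec: either no dot (head = l, sep/tail empty), or l = head ++ '.' :: tail, head dot-free
theorem pv_partition_spec (l : List Char) :
    ((pvPartitionDot l).2.1 = [] ∧ (pvPartitionDot l).2.2 = [] ∧ (pvPartitionDot l).1 = l ∧ '.' ∉ l) ∨
    ((pvPartitionDot l).2.1 = ['.'] ∧ l = (pvPartitionDot l).1 ++ '.' :: (pvPartitionDot l).2.2 ∧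
      '.' ∉ (pvPartitionDot l).1) := by
  induction l with
  | nil => left; simp [pvPartitionDot]
  | cons c cs ih =>
    by_cases hc : c = '.'
    · right
      subst hc
      simp [pvPartitionDot]
    · rcases ih with ⟨h1, h2, h3, h4⟩ | ⟨h1, h2, h3⟩
      · left
        refine ⟨?_, ?_, ?_, ?_⟩ <;>
          simp [pvPartitionDot, hc, h1, h2, h3, h4, Ne.symm hc]
      · right
        refine ⟨?_, ?_, ?_⟩
        · simp [pvPartitionDot, hc, h1]
        · simpa [pvPartitionDot, hc] using congrArg (c :: ·) h2
        · simp [pvPartitionDot, hc, Ne.symm hc, h3]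

-- ===== VERDICT (by name: the statement is the Claim_ definition above) =====
theorem clean_string_strict_spec : Claim_equal_clean_string_strict := by
  intro s _
  unfold Spec_clean_string_strict clean_string_strict clean_string_strict_alt
  apply congrArg String.mk
  have hfold : s.toList.foldl (fun clean_values c =>
      match PySem.Int.ofChars? [c] with
      | some n => clean_values ++ PySem.Int.toChars n
      | none => if c = '.' ∧ c ∉ clean_values then clean_values ++ [c] else clean_values) [] =
      s.toList.foldl pvStepA [] := rfl
  rw [hfold, pv_keepInts_eq_dig, pv_keepInts_eq_dig]
  rcases pv_partition_spec s.toList with ⟨h1, h2, h3, h4⟩ | ⟨h1, h2, h3⟩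
  · rw [pv_loop_no_dot _ _ h4, h1, h2, h3]
    simp [pvDig]
  · conv_lhs => rw [h2]
    rw [List.foldl_append, pv_loop_no_dot _ _ h3, List.foldl_cons,
      pv_stepA_none _ _ (by decide),
      if_pos ⟨rfl, fun h => pv_dig_no_dot _ (by simpa using h)⟩,
      pv_loop_seen _ _ (by simp), h1]
    simp
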